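-- pv_equiv track=rewrite | github.com/vDarfur2/490Thesis | user_study/restitch.py | tile_id_to_xy
-- ===== SOURCE A (Python) =====
-- def tile_id_to_xy(widthTiles, heightTiles):
--     tile_id = 0
--     tile_dict = {}
--     for i in range(0, widthTiles):
--         for j in range(0, heightTiles):
--             tile_dict[tile_id] = (j ,i)
--             tile_id += 1
--
--     return tile_dict
-- ===== SOURCE B (Python) =====
-- def tile_id_to_xy(widthTiles, heightTiles):
--     if heightTiles <= 0:
--         return {}
--     return {tid: (tid % heightTiles, tid // heightTiles)
--             for tid in range(widthTiles * heightTiles)}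
-- ===== Notes on version B (the rewrite author's own statement) =====
-- stated objective: idiomatic
-- what changed: Replaces the nested width/height loops with an explicit tile-id counter by a single dict comprehension over range(widthTiles*heightTiles), recovering (j, i) arithmetically as (tid % heightTiles, tid // heightTiles).
import Mathlib
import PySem

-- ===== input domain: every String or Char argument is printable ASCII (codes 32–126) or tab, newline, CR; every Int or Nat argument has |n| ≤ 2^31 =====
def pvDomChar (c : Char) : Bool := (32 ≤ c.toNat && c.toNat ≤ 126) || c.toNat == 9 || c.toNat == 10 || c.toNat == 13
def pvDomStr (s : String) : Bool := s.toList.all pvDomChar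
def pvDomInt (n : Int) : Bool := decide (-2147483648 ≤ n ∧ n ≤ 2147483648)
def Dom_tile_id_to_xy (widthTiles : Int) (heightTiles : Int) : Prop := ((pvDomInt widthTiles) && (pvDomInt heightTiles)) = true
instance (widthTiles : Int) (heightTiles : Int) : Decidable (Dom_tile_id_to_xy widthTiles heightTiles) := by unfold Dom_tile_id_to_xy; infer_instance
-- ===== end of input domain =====

-- B replaces the nested width/height loops with a counter by one flat pass over
-- range(widthTiles*heightTiles), recovering (j, i) as (tid % h, tid // h) (idiomatic, same cost).

-- ===== PORT A =====
def tile_id_to_xy (widthTiles : Int) (heightTiles : Int) : List (Int × Int × Int) :=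
  let st :=
    (PySem.List.pyRange 0 widthTiles 1).foldl
      (fun (st : Int × PySem.Dict Int (Int × Int)) i =>
        (PySem.List.pyRange 0 heightTiles 1).foldl
          (fun st j => (st.1 + 1, st.2.insert st.1 (j, i))) st)
      ((0 : Int), (PySem.Dict.empty : PySem.Dict Int (Int × Int)))
  st.2.items

-- ===== PORT B =====
def tile_id_to_xy_alt (widthTiles : Int) (heightTiles : Int) : List (Int × Int × Int) :=
  if heightTiles ≤ 0 then []
  else
    ((PySem.List.pyRange 0 (widthTiles * heightTiles) 1).foldl
      (fun (d : PySem.Dict Int (Int × Int)) tid =>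
        d.insert tid (PySem.Int.mod tid heightTiles, PySem.Int.floordiv tid heightTiles))
      PySem.Dict.empty).items

-- ===== PRECONDITION & SPEC =====
def Spec_tile_id_to_xy (widthTiles : Int) (heightTiles : Int) (out : List (Int × Int × Int)) : Prop := out = tile_id_to_xy_alt widthTiles heightTiles
instance (widthTiles : Int) (heightTiles : Int) (out : List (Int × Int × Int)) : Decidable (Spec_tile_id_to_xy widthTiles heightTiles out) := by unfold Spec_tile_id_to_xy; infer_instance

-- ===== CLAIM (what is proved, stated in full; the proofs are below) =====
def Claim_equal_tile_id_to_xy : Prop := ∀ (widthTiles : Int) (heightTiles : Int), Dom_tile_id_to_xy widthTiles heightTiles → Spec_tile_id_to_xy widthTiles heightTiles (tile_id_to_xy widthTiles heightTiles)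

-- ===== LEMMAS AND PROOFS =====

-- A's inner loop: starting from counter t with all keys of d below t,
-- it appends the h pairs and advances the counter by h.
lemma innerA (i t : Int) (d : PySem.Dict Int (Int × Int))
    (hd : ∀ k, d.contains k = true → k < t) (H : Nat) :
    (((List.range H).map (fun k : Nat => (k : Int))).foldl
        (fun st j => (st.1 + 1, st.2.insert st.1 (j, i))) (t, d)).1 = t + H ∧
    (((List.range H).map (fun k : Nat => (k : Int))).foldl
        (fun st j => (st.1 + 1, st.2.insert st.1 (j, i))) (t, d)).2.items
      = d.items ++ (List.range H).map (fun j : Nat => ((t + j : Int), ((j : Int), i))) ∧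
    (∀ k, (((List.range H).map (fun k : Nat => (k : Int))).foldl
        (fun st j => (st.1 + 1, st.2.insert st.1 (j, i))) (t, d)).2.contains k = true →
        k < t + H) := by
  induction H with
  | zero => simpa using hd
  | succ n ih =>
    obtain ⟨h1, h2, h3⟩ := ih
    rw [List.range_succ, List.map_append, List.foldl_append]
    set st := ((List.range n).map (fun k : Nat => (k : Int))).foldl
        (fun st j => (st.1 + 1, st.2.insert st.1 (j, i))) (t, d) with hst
    have hfresh : st.2.contains st.1 = false := by
      by_contra hc
      have := h3 st.1 (by revert hc; cases st.2.contains st.1 <;> simp)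
      omega
    refine ⟨by simp [h1]; omega, ?_, ?_⟩
    · simp only [List.map_cons, List.map_nil, List.foldl_cons, List.foldl_nil]
      rw [PySem.Dict.items_insert_of_not_contains _ _ hfresh, h2,
        List.map_append, List.append_assoc]
      simp [h1]
    · intro k hk
      simp only [List.map_cons, List.map_nil, List.foldl_cons, List.foldl_nil] at hk
      rw [PySem.Dict.contains_insert] at hk
      rcases Bool.or_eq_true_iff.1 hk with hk | hk
      · have : k = st.1 := by simpa using hk
        omega
      · have := h3 k hk
        omega

-- A's outer loop produces exactly the row-major list of (tid, tid % h, tid / h).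
lemma outerA (h : Int) (hh : 0 < h) (W : Nat) :
    (((List.range W).map (fun k : Nat => (k : Int))).foldl
        (fun (st : Int × PySem.Dict Int (Int × Int)) i =>
          (PySem.List.pyRange 0 h 1).foldl
            (fun st j => (st.1 + 1, st.2.insert st.1 (j, i))) st)
        ((0 : Int), PySem.Dict.empty)).1 = (W : Int) * h ∧
    (((List.range W).map (fun k : Nat => (k : Int))).foldl
        (fun (st : Int × PySem.Dict Int (Int × Int)) i =>
          (PySem.List.pyRange 0 h 1).foldl
            (fun st j => (st.1 + 1, st.2.insert st.1 (j, i))) st)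
        ((0 : Int), PySem.Dict.empty)).2.items
      = (List.range (W * h.toNat)).map
          (fun tid : Nat => ((tid : Int), ((tid : Int) % h, (tid : Int) / h))) ∧
    (∀ k, (((List.range W).map (fun k : Nat => (k : Int))).foldl
        (fun (st : Int × PySem.Dict Int (Int × Int)) i =>
          (PySem.List.pyRange 0 h 1).foldl
            (fun st j => (st.1 + 1, st.2.insert st.1 (j, i))) st)
        ((0 : Int), PySem.Dict.empty)).2.contains k = true → k < (W : Int) * h) := by
  have hcast : (h.toNat : Int) = h := Int.toNat_of_nonneg hh.le
  induction W with
  | zero =>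
    refine ⟨by simp, ?_, ?_⟩
    · simp only [Nat.zero_mul, List.range_zero, List.map_nil, List.foldl_nil]
      rfl
    intro k hk
    simp [PySem.Dict.contains_empty] at hk
  | succ n ih =>
    obtain ⟨h1, h2, h3⟩ := ih
    rw [List.range_succ, List.map_append, List.foldl_append]
    set st := (((List.range n).map (fun k : Nat => (k : Int))).foldl
        (fun (st : Int × PySem.Dict Int (Int × Int)) i =>
          (PySem.List.pyRange 0 h 1).foldl
            (fun st j => (st.1 + 1, st.2.insert st.1 (j, i))) st)
        ((0 : Int), PySem.Dict.empty)) with hst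
    have hpr : PySem.List.pyRange 0 h 1
        = (List.range h.toNat).map (fun k : Nat => (k : Int)) := by
      have := PySem.List.pyRange_one 0 h
      simpa using this
    have hsplit : st = ((n : Int) * h, st.2) := by
      rw [← h1]
    have hin := innerA ((n : Int)) ((n : Int) * h) st.2 h3 h.toNat
    obtain ⟨g1, g2, g3⟩ := hin
    simp only [List.map_cons, List.map_nil, List.foldl_cons, List.foldl_nil, hpr]
    rw [hsplit]
    have hmul : ((n : Int) + 1) * h = (n : Int) * h + h := by ring
    refine ⟨?_, ?_, ?_⟩
    · rw [g1, hcast]; push_cast; ring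
    · rw [g2, h2, Nat.succ_mul, List.range_add, List.map_append, List.map_map]
      congr 1
      apply List.map_congr_left
      intro j hj
      have hj' : (j : Int) < h := by
        have := List.mem_range.1 hj
        omega
      have hj0 : (0 : Int) ≤ (j : Int) := by positivity
      have hM : ((n * h.toNat + j : Nat) : Int) = (n : Int) * h + (j : Int) := by
        push_cast
        rw [hcast]
      simp only [Function.comp]
      rw [hM]
      refine Prod.ext ?_ (Prod.ext ?_ ?_)
      · rfl
      · rw [show ((n : Int) * h + (j : Int)) = (j : Int) + h * (n : Int) by ring,
          Int.add_mul_emod_self_left, Int.emod_eq_of_lt hj0 hj']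
      · rw [show ((n : Int) * h + (j : Int)) = ((j : Int) + (n : Int) * h) by ring,
          Int.add_mul_ediv_right _ _ (by omega : h ≠ 0),
          Int.ediv_eq_zero_of_lt hj0 hj']
        simp
    · intro k hk
      have hb := g3 k hk
      rw [hcast] at hb
      push_cast
      linarith

-- ===== VERDICT (by name: the statement is the Claim_ definition above) =====
theorem tile_id_to_xy_spec : Claim_equal_tile_id_to_xy := by
  intro w h _
  unfold Spec_tile_id_to_xy tile_id_to_xy tile_id_to_xy_alt
  by_cases hh : h ≤ 0
  · -- inner range empty: the outer loop never changes the state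
    have hpr : PySem.List.pyRange 0 h 1 = [] := by
      rw [PySem.List.pyRange_one]
      have h0 : (h - 0).toNat = 0 := by omega
      rw [h0]
      simp
    simp only [hpr, List.foldl_nil, if_pos hh]
    have hid : ∀ (l : List Int) (s : Int × PySem.Dict Int (Int × Int)),
        l.foldl (fun st _ => st) s = s := by
      intro l
      induction l with
      | nil => intro s; rfl
      | cons a l ih => intro s; simpa using ih s
    rw [hid]
    rfl
  · push_neg at hh
    rw [if_neg (by omega)]
    have hw : PySem.List.pyRange 0 w 1
        = (List.range w.toNat).map (fun k : Nat => (k : Int)) := by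
      have := PySem.List.pyRange_one 0 w
      simpa using this
    have hA := (outerA h hh w.toNat).2.1
    simp only [hw]
    rw [hA]
    -- B: all inserted keys are fresh and distinct, so the loop appends in order
    have hB := PySem.Dict.items_foldl_insert_fresh (PySem.List.pyRange 0 (w * h) 1)
      (fun tid => tid)
      (fun tid => (PySem.Int.mod tid h, PySem.Int.floordiv tid h))
      PySem.Dict.empty
      (by intro a _; simp [PySem.Dict.contains_empty])
      (by simpa using PySem.List.nodup_pyRange_one 0 (w * h))
    rw [show PySem.Dict.empty.items = ([] : List (Int × Int × Int)) from rfl,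
      List.nil_append] at hB
    rw [hB]
    have hw2 : PySem.List.pyRange 0 (w * h) 1
        = (List.range (w * h).toNat).map (fun k : Nat => (k : Int)) := by
      have := PySem.List.pyRange_one 0 (w * h)
      simpa using this
    rw [hw2, List.map_map]
    have hN : (w * h).toNat = w.toNat * h.toNat := by
      by_cases hw0 : 0 ≤ w
      · rw [Int.toNat_mul hw0 hh.le]
      · have h1 : w * h < 0 := mul_neg_of_neg_of_pos (by omega) hh
        have h2 : w.toNat = 0 := by omega
        simp [h2]
        omega
    rw [hN]
    apply List.map_congr_left
    intro tid _
    simp [Function.comp, PySem.Int.mod_eq_emod_of_pos hh, PySem.Int.floordiv_eq_ediv_of_pos hh]
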